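-- pv_equiv track=rewrite | github.com/DSW41923/cryptopals_DSW41923 | challenge_23.py | recover_rng_state
-- ===== SOURCE A (Python) =====
-- def recover_rng_state(source):
--     state = []
--     for y in source:
--         x_n = int(y, 2)
--
--         # Inverse last computation
--         # x_n = x_3 ^ (x_3 >> 18)
--         x_3 = x_n ^ (x_n >> 18)
--
--         # Inverse second last computation
--         # x_3 = x_2 ^ ((x_2 << 15) & 0xEFC60000)
--         x_2 = x_3 % (2 ** 17)
--         x_2 += ((((x_2 >> 2) & (0xEFC6 >> 1)) ^ (x_3 >> 17))) << 17
--
--         # Inverse second computation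
--         # x_2 = x_1 ^ ((x_1 << 7) & 0x9D2C5680)
--         x_1 = x_2 % (2 ** 7)
--         magic_num = 0x9D2C5680
--         for i in range(3):
--             a = 7 * i
--             b = 7 * (i + 1)
--             c = 2 ** 7
--             l = (x_1 >> a) % c
--             m = (magic_num >> b) % c
--             n = (x_2 >> b) % c
--             x_1 += ((l & m) ^ n) << b
--         x_1 += ((((x_1 >> 21) % 16) & ((magic_num >> 28) % 16)) ^ ((x_2 >> 28)) % 16) << 28
--
--         # Inverse first computation
--         # x_1 = x_0 ^ ((x_0 >> 11) & 0xFFFFFFFF)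
--         x_0 = (x_1 >> 21) << 21
--         x_0 += (((x_1 >> 10) % (2 ** 11)) ^ ((x_0 >> 21) & int("1" * 11, 2))) << 10
--         x_0 += (x_1 % (2 ** 10)) ^ (((x_0 >> 11) % (2 ** 10)) & int("1" * 10, 2))
--
--         state.append(x_0)
--
--     return state
-- ===== SOURCE B (Python) =====
-- MASK32 = 0xFFFFFFFF
--
-- def _undo_right_shift(y, s):
--     result = y
--     for _ in range(-(-32 // s)):
--         result = y ^ (result >> s)
--     return result & MASK32
--
-- def _undo_left_shift(y, s, mask):
--     result = y
--     for _ in range(-(-32 // s)):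
--         result = y ^ ((result << s) & mask)
--     return result & MASK32
--
-- def recover_rng_state(source):
--     state = []
--     for y in source:
--         x = int(y, 2)
--         x = _undo_right_shift(x, 18)
--         x = _undo_left_shift(x, 15, 0xEFC60000)
--         x = _undo_left_shift(x, 7, 0x9D2C5680)
--         x = _undo_right_shift(x, 11)
--         state.append(x)
--     return state
-- ===== Notes on version B (the rewrite author's own statement) =====
-- stated objective: simpler
-- what changed: Replaces A's hand-unrolled per-chunk bit surgery (ad-hoc modular slices and shifted adds for each tempering step) by the canonical MT19937 untemper: two generic helpers that iterate y ^= (y >> s) resp. y ^= ((y << s) & mask) a fixed ceil(32/s) number of times, applied in reverse tempering order, with an explicit 32-bit mask.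
-- outside the precondition, e.g. on recover_rng_state(['100000000000000000000000000000000000001']): A returns [406013673], B returns [2569103017]; on recover_rng_state(['-101']): A returns [2165448768], B returns [2634828530]
import Mathlib
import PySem

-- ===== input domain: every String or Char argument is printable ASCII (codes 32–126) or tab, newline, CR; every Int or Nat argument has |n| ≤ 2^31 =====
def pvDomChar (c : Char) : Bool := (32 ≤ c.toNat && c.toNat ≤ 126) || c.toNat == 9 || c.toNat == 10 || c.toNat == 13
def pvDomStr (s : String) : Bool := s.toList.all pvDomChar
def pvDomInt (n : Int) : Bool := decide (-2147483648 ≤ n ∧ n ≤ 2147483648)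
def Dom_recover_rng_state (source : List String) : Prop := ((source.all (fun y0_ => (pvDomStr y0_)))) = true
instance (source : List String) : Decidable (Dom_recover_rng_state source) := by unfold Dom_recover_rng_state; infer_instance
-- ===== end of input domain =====

-- B replaces A's hand-unrolled per-chunk bit surgery by the canonical MT19937 untemper
-- (two generic shift-undo helpers iterated ceil(32/s) times, 32-bit masked); objective: simpler.


-- ===== PORT A =====
def recover_rng_state (source : List String) : List Int :=
  source.foldl (fun state y =>
    let x_n : Int := (PySem.Int.ofStrBase? y 2).getD 0   -- int(y, 2); Pre_ excludes the ValueError case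
    -- Inverse last computation
    let x_3 := PySem.Int.bxor x_n (x_n >>> 18)
    -- Inverse second last computation
    let x_2 := PySem.Int.mod x_3 (2 ^ 17)
    let x_2 := x_2 + (PySem.Int.bxor (PySem.Int.band (x_2 >>> 2) ((0xEFC6 : Int) >>> 1)) (x_3 >>> 17)) <<< 17
    -- Inverse second computation
    let x_1 := PySem.Int.mod x_2 (2 ^ 7)
    let magic_num : Int := 0x9D2C5680
    let x_1 := (PySem.List.pyRange 0 3 1).foldl (fun (x_1 : Int) i =>
        let a := 7 * i
        let b := 7 * (i + 1)
        let c : Int := 2 ^ 7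
        let l := PySem.Int.mod (x_1 >>> a) c
        let m := PySem.Int.mod (magic_num >>> b) c
        let n := PySem.Int.mod (x_2 >>> b) c
        x_1 + (PySem.Int.bxor (PySem.Int.band l m) n) <<< b) x_1
    let x_1 := x_1 + (PySem.Int.bxor (PySem.Int.band (PySem.Int.mod (x_1 >>> 21) 16)
                        (PySem.Int.mod (magic_num >>> 28) 16)) (PySem.Int.mod (x_2 >>> 28) 16)) <<< 28
    -- Inverse first computation
    let x_0 := (x_1 >>> 21) <<< 21
    let x_0 := x_0 + (PySem.Int.bxor (PySem.Int.mod (x_1 >>> 10) (2 ^ 11))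
                        (PySem.Int.band (x_0 >>> 21) 2047)) <<< 10        -- int("1"*11, 2) = 2047
    let x_0 := x_0 + PySem.Int.bxor (PySem.Int.mod x_1 (2 ^ 10))
                        (PySem.Int.band (PySem.Int.mod (x_0 >>> 11) (2 ^ 10)) 1023)  -- int("1"*10, 2) = 1023
    state ++ [x_0]) []

-- ===== PORT B =====
def pvUndoRightShift (y : Int) (s : Int) : Int :=
  PySem.Int.band
    ((PySem.List.pyRange 0 (-(PySem.Int.floordiv (-32) s)) 1).foldl
      (fun result _ => PySem.Int.bxor y (result >>> s)) y)
    0xFFFFFFFF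

def pvUndoLeftShift (y : Int) (s : Int) (mask : Int) : Int :=
  PySem.Int.band
    ((PySem.List.pyRange 0 (-(PySem.Int.floordiv (-32) s)) 1).foldl
      (fun result _ => PySem.Int.bxor y (PySem.Int.band (result <<< s) mask)) y)
    0xFFFFFFFF

def recover_rng_state_alt (source : List String) : List Int :=
  source.map (fun y =>
    let x := (PySem.Int.ofStrBase? y 2).getD 0
    let x := pvUndoRightShift x 18
    let x := pvUndoLeftShift x 15 0xEFC60000
    let x := pvUndoLeftShift x 7 0x9D2C5680
    pvUndoRightShift x 11)

-- ===== PRECONDITION & SPEC =====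
-- Pre_ excludes strings on which int(y, 2) raises ValueError (A raises there), and strings whose
-- parsed value is negative or at least 2^32: A's fixed 32-bit chunk surgery is only meaningful on
-- 32-bit MT19937 outputs, and its values outside that range are artefacts of its implementation.
def Pre_recover_rng_state (source : List String) : Prop :=
  ∀ y ∈ source, (PySem.Int.ofStrBase? y 2).isSome = true ∧
    0 ≤ (PySem.Int.ofStrBase? y 2).getD 0 ∧ (PySem.Int.ofStrBase? y 2).getD 0 < 2 ^ 32
instance (source : List String) : Decidable (Pre_recover_rng_state source) := by
  unfold Pre_recover_rng_state; infer_instance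

def pvWitness_recover_rng_state : List String := ["110", "1011110001011100"]

def Spec_recover_rng_state (source : List String) (out : List Int) : Prop := out = recover_rng_state_alt source
instance (source : List String) (out : List Int) : Decidable (Spec_recover_rng_state source out) := by unfold Spec_recover_rng_state; infer_instance

-- ===== CLAIM (what is proved, stated in full; the proofs are below) =====
def Claim_equal_recover_rng_state : Prop := ∀ (source : List String), Dom_recover_rng_state source → Pre_recover_rng_state source → Spec_recover_rng_state source (recover_rng_state source)

-- ===== LEMMAS AND PROOFS =====
set_option maxHeartbeats 2000000

lemma pvHigh {y : Nat} (h : y < 2^32) {i : Nat} (hi : 32 ≤ i) : y.testBit i = false :=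
  Nat.testBit_lt_two_pow (lt_of_lt_of_le h (Nat.pow_le_pow_right (by norm_num) hi))

lemma pvAddShift (a b k j : Nat) (h : a < 2^k) :
    (a + b <<< k).testBit j = if j < k then a.testBit j else b.testBit (j - k) := by
  rw [Nat.shiftLeft_eq, mul_comm, add_comm, Nat.testBit_two_pow_mul_add _ h]

lemma pvConstBit (c : Nat) (L : List Nat) (hc : c < 2^32)
    (hL : ∀ j, j < 32 → (c.testBit j = decide (j ∈ L))) (j : Nat) (hh : ∀ x ∈ L, x < 32) :
    c.testBit j = decide (j ∈ L) := by
  rcases lt_or_ge j 32 with h | h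
  · exact hL j h
  · rw [pvHigh hc h]; symm; rw [decide_eq_false_iff_not]
    intro hm; exact absurd (hh j hm) (by omega)

lemma pvBitsMask (j : Nat) : Nat.testBit 4294967295 j = decide (j < 32) := by
  rw [show (4294967295:Nat) = 2^32 - 1 by norm_num, Nat.testBit_two_pow_sub_one]
lemma pvBits4022730752 (j : Nat) : Nat.testBit 4022730752 j = decide (j ∈ [17, 18, 22, 23, 24, 25, 26, 27, 29, 30, 31]) :=
  pvConstBit _ _ (by norm_num) (by intro j h; interval_cases j <;> decide) j (by decide)
lemma pvBits2636928640 (j : Nat) : Nat.testBit 2636928640 j = decide (j ∈ [7, 9, 10, 12, 14, 18, 19, 21, 24, 26, 27, 28, 31]) :=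
  pvConstBit _ _ (by norm_num) (by intro j h; interval_cases j <;> decide) j (by decide)
lemma pvBits30691 (j : Nat) : Nat.testBit 30691 j = decide (j ∈ [0, 1, 5, 6, 7, 8, 9, 10, 12, 13, 14]) :=
  pvConstBit _ _ (by norm_num) (by intro j h; interval_cases j <;> decide) j (by decide)
lemma pvBits45 (j : Nat) : Nat.testBit 45 j = decide (j ∈ [0, 2, 3, 5]) :=
  pvConstBit _ _ (by norm_num) (by intro j h; interval_cases j <;> decide) j (by decide)
lemma pvBits49 (j : Nat) : Nat.testBit 49 j = decide (j ∈ [0, 4, 5]) :=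
  pvConstBit _ _ (by norm_num) (by intro j h; interval_cases j <;> decide) j (by decide)
lemma pvBits105 (j : Nat) : Nat.testBit 105 j = decide (j ∈ [0, 3, 5, 6]) :=
  pvConstBit _ _ (by norm_num) (by intro j h; interval_cases j <;> decide) j (by decide)
lemma pvBits9 (j : Nat) : Nat.testBit 9 j = decide (j ∈ [0, 3]) :=
  pvConstBit _ _ (by norm_num) (by intro j h; interval_cases j <;> decide) j (by decide)
lemma pvBits2047 (j : Nat) : Nat.testBit 2047 j = decide (j ∈ [0, 1, 2, 3, 4, 5, 6, 7, 8, 9, 10]) :=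
  pvConstBit _ _ (by norm_num) (by intro j h; interval_cases j <;> decide) j (by decide)
lemma pvBits1023 (j : Nat) : Nat.testBit 1023 j = decide (j ∈ [0, 1, 2, 3, 4, 5, 6, 7, 8, 9]) :=
  pvConstBit _ _ (by norm_num) (by intro j h; interval_cases j <;> decide) j (by decide)
lemma pvMod131072 (x j : Nat) : (x % 131072).testBit j = (decide (j < 17) && x.testBit j) := by
  rw [show (131072:Nat) = 2^17 by norm_num, Nat.testBit_mod_two_pow]
lemma pvMod128 (x j : Nat) : (x % 128).testBit j = (decide (j < 7) && x.testBit j) := by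
  rw [show (128:Nat) = 2^7 by norm_num, Nat.testBit_mod_two_pow]
lemma pvMod16 (x j : Nat) : (x % 16).testBit j = (decide (j < 4) && x.testBit j) := by
  rw [show (16:Nat) = 2^4 by norm_num, Nat.testBit_mod_two_pow]
lemma pvMod2048 (x j : Nat) : (x % 2048).testBit j = (decide (j < 11) && x.testBit j) := by
  rw [show (2048:Nat) = 2^11 by norm_num, Nat.testBit_mod_two_pow]
lemma pvMod1024 (x j : Nat) : (x % 1024).testBit j = (decide (j < 10) && x.testBit j) := by
  rw [show (1024:Nat) = 2^10 by norm_num, Nat.testBit_mod_two_pow]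

def pvN1 (y : Nat) : Nat := y ^^^ (y >>> 18)
def pvN2 (y : Nat) : Nat := (y % 131072) + ((((y % 131072) >>> 2) &&& 30691) ^^^ (y >>> 17)) <<< 17
def pvN3 (y : Nat) : Nat := ((((y % 128) + ((((y % 128) >>> 0) % 128 &&& 45) ^^^ ((y >>> 7) % 128)) <<< 7) + (((((y % 128) + ((((y % 128) >>> 0) % 128 &&& 45) ^^^ ((y >>> 7) % 128)) <<< 7) >>> 7) % 128 &&& 49) ^^^ ((y >>> 14) % 128)) <<< 14) + ((((((y % 128) + ((((y % 128) >>> 0) % 128 &&& 45) ^^^ ((y >>> 7) % 128)) <<< 7) + (((((y % 128) + ((((y % 128) >>> 0) % 128 &&& 45) ^^^ ((y >>> 7) % 128)) <<< 7) >>> 7) % 128 &&& 49) ^^^ ((y >>> 14) % 128)) <<< 14) >>> 14) % 128 &&& 105) ^^^ ((y >>> 21) % 128)) <<< 21) + (((((((y % 128) + ((((y % 128) >>> 0) % 128 &&& 45) ^^^ ((y >>> 7) % 128)) <<< 7) + (((((y % 128) + ((((y % 128) >>> 0) % 128 &&& 45) ^^^ ((y >>> 7) % 128)) <<< 7) >>>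 7) % 128 &&& 49) ^^^ ((y >>> 14) % 128)) <<< 14) + ((((((y % 128) + ((((y % 128) >>> 0) % 128 &&& 45) ^^^ ((y >>> 7) % 128)) <<< 7) + (((((y % 128) + ((((y % 128) >>> 0) % 128 &&& 45) ^^^ ((y >>> 7) % 128)) <<< 7) >>> 7) % 128 &&& 49) ^^^ ((y >>> 14) % 128)) <<< 14) >>> 14) % 128 &&& 105) ^^^ ((y >>> 21) % 128)) <<< 21) >>> 21) % 16 &&& 9) ^^^ ((y >>> 28) % 16)) <<< 28
def pvN4 (y : Nat) : Nat := (((y >>> 21) <<< 21) + (((y >>> 10) % 2048) ^^^ ((((y >>> 21) <<< 21) >>> 21) &&& 2047)) <<< 10) + ((y % 1024) ^^^ (((((y >>> 21) <<< 21) + (((y >>> 10) % 2048) ^^^ ((((y >>> 21) <<< 21) >>> 21) &&& 2047)) <<< 10) >>> 11) % 1024 &&& 1023))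
def pvM1 (y : Nat) : Nat := (y ^^^ ((y ^^^ (y >>> 18)) >>> 18)) &&& 4294967295
def pvM2 (y : Nat) : Nat := (y ^^^ (((y ^^^ (((y ^^^ ((y <<< 15) &&& 4022730752)) <<< 15) &&& 4022730752)) <<< 15) &&& 4022730752)) &&& 4294967295
def pvM3 (y : Nat) : Nat := (y ^^^ (((y ^^^ (((y ^^^ (((y ^^^ (((y ^^^ ((y <<< 7) &&& 2636928640)) <<< 7) &&& 2636928640)) <<< 7) &&& 2636928640)) <<< 7) &&& 2636928640)) <<< 7) &&& 2636928640)) &&& 4294967295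
def pvM4 (y : Nat) : Nat := (y ^^^ ((y ^^^ ((y ^^^ (y >>> 11)) >>> 11)) >>> 11)) &&& 4294967295

lemma pvMaskLt (x : Nat) : x &&& 4294967295 < 2^32 := Nat.and_lt_two_pow x (by norm_num)
lemma pvM1_lt (y : Nat) : pvM1 y < 2^32 := pvMaskLt _
lemma pvM2_lt (y : Nat) : pvM2 y < 2^32 := pvMaskLt _
lemma pvM3_lt (y : Nat) : pvM3 y < 2^32 := pvMaskLt _

lemma pvS1 (y : Nat) (h : y < 2^32) : pvN1 y = pvM1 y := by
  have h30 : ∀ k, 32 ≤ k → y.testBit k = false := fun k hk => pvHigh h hk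
  apply Nat.eq_of_testBit_eq; intro i
  unfold pvN1 pvM1
  rcases lt_or_ge i 32 with hi | hi
  · interval_cases i <;> (simp only [Nat.testBit_xor, Nat.testBit_and, Nat.testBit_shiftRight, Nat.testBit_shiftLeft, pvBits4022730752, pvBits2636928640, pvBits30691, pvBits45, pvBits49, pvBits105, pvBits9, pvBits2047, pvBits1023, pvMod131072, pvMod128, pvMod16, pvMod2048, pvMod1024, pvBitsMask, Nat.reduceSub, Nat.reduceAdd, Nat.reduceLT, Nat.reduceLeDiff, reduceIte, decide_eq_true_eq, List.mem_cons, List.mem_singleton, List.not_mem_nil]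
       <;> simp [h30, Bool.xor_comm, Bool.xor_left_comm, Bool.xor_assoc, Bool.and_comm, Bool.and_left_comm, Bool.and_assoc])
  · simp [-Nat.testBit_zero, h30 i (by omega), h30 (18+i) (by omega), h30 (18+(18+i)) (by omega),
      Nat.testBit_xor, Nat.testBit_and, Nat.testBit_shiftRight, pvBitsMask, show ¬ i < 32 by omega]

lemma pvS2 (y : Nat) (h : y < 2^32) : pvN2 y = pvM2 y := by
  have h30 : ∀ k, 32 ≤ k → y.testBit k = false := fun k hk => pvHigh h hk
  have H17 : ∀ b j, ((y % 131072) + b <<< 17).testBit j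
      = if j < 17 then (y % 131072).testBit j else b.testBit (j - 17) :=
    fun b j => pvAddShift _ _ 17 _ (Nat.mod_lt _ (by norm_num))
  apply Nat.eq_of_testBit_eq; intro i
  unfold pvN2 pvM2
  rcases lt_or_ge i 32 with hi | hi
  · interval_cases i <;> (simp only [H17, Nat.testBit_xor, Nat.testBit_and, Nat.testBit_shiftRight, Nat.testBit_shiftLeft, pvBits4022730752, pvBits2636928640, pvBits30691, pvBits45, pvBits49, pvBits105, pvBits9, pvBits2047, pvBits1023, pvMod131072, pvMod128, pvMod16, pvMod2048, pvMod1024, pvBitsMask, Nat.reduceSub, Nat.reduceAdd, Nat.reduceLT, Nat.reduceLeDiff, reduceIte, decide_eq_true_eq, List.mem_cons, List.mem_singleton, List.not_mem_nil]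
       <;> simp [h30, Bool.xor_comm, Bool.xor_left_comm, Bool.xor_assoc, Bool.and_comm, Bool.and_left_comm, Bool.and_assoc])
  · simp [-Nat.testBit_zero, H17, h30 i (by omega), pvMod131072,
      show ¬ i < 17 by omega, show ¬ i < 32 by omega, show ¬ 2 + (i-17) < 17 by omega,
      Nat.testBit_xor, Nat.testBit_and, Nat.testBit_shiftRight, pvBitsMask,
      h30 (17 + (i - 17)) (by omega)]

lemma pvS3 (y : Nat) (h : y < 2^32) : pvN3 y = pvM3 y := by
  have h30 : ∀ k, 32 ≤ k → y.testBit k = false := fun k hk => pvHigh h hk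
  have hx1b : ((y % 128) + ((((y % 128) >>> 0) % 128 &&& 45) ^^^ ((y >>> 7) % 128)) <<< 7) < 2^14 := by
    have hc : ((((y % 128) >>> 0) % 128 &&& 45) ^^^ ((y >>> 7) % 128)) < 2^7 :=
      Nat.xor_lt_two_pow (Nat.and_lt_two_pow _ (by decide)) (Nat.mod_lt _ (by norm_num))
    have hx0 : (y % 128) < 2^7 := Nat.mod_lt _ (by norm_num)
    have e : ((((y % 128) >>> 0) % 128 &&& 45) ^^^ ((y >>> 7) % 128)) <<< 7 = ((((y % 128) >>> 0) % 128 &&& 45) ^^^ ((y >>> 7) % 128)) * 128 := Nat.shiftLeft_eq _ _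
    omega
  unfold pvN3 pvM3
  generalize hx1 : ((y % 128) + ((((y % 128) >>> 0) % 128 &&& 45) ^^^ ((y >>> 7) % 128)) <<< 7) = X1
  rw [hx1] at hx1b
  have hx2b : X1 + (((X1 >>> 7) % 128 &&& 49) ^^^ ((y >>> 14) % 128)) <<< 14 < 2^21 := by
    have hc : (((X1 >>> 7) % 128 &&& 49) ^^^ ((y >>> 14) % 128)) < 2^7 :=
      Nat.xor_lt_two_pow (Nat.and_lt_two_pow _ (by decide)) (Nat.mod_lt _ (by norm_num))
    have e : (((X1 >>> 7) % 128 &&& 49) ^^^ ((y >>> 14) % 128)) <<< 14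
        = (((X1 >>> 7) % 128 &&& 49) ^^^ ((y >>> 14) % 128)) * 16384 := Nat.shiftLeft_eq _ _
    omega
  generalize hx2 : X1 + (((X1 >>> 7) % 128 &&& 49) ^^^ ((y >>> 14) % 128)) <<< 14 = X2
  rw [hx2] at hx2b
  have hx3b : X2 + (((X2 >>> 14) % 128 &&& 105) ^^^ ((y >>> 21) % 128)) <<< 21 < 2^28 := by
    have hc : (((X2 >>> 14) % 128 &&& 105) ^^^ ((y >>> 21) % 128)) < 2^7 :=
      Nat.xor_lt_two_pow (Nat.and_lt_two_pow _ (by decide)) (Nat.mod_lt _ (by norm_num))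
    have e : (((X2 >>> 14) % 128 &&& 105) ^^^ ((y >>> 21) % 128)) <<< 21
        = (((X2 >>> 14) % 128 &&& 105) ^^^ ((y >>> 21) % 128)) * 2097152 := Nat.shiftLeft_eq _ _
    omega
  generalize hx3 : X2 + (((X2 >>> 14) % 128 &&& 105) ^^^ ((y >>> 21) % 128)) <<< 21 = X3
  rw [hx3] at hx3b
  have H7 : ∀ b j, ((y % 128) + b <<< 7).testBit j
      = if j < 7 then (y % 128).testBit j else b.testBit (j - 7) :=
    fun b j => pvAddShift _ _ 7 _ (Nat.mod_lt _ (by norm_num))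
  have H14 : ∀ b j, (X1 + b <<< 14).testBit j
      = if j < 14 then X1.testBit j else b.testBit (j - 14) := fun b j => pvAddShift _ _ 14 _ hx1b
  have H21 : ∀ b j, (X2 + b <<< 21).testBit j
      = if j < 21 then X2.testBit j else b.testBit (j - 21) := fun b j => pvAddShift _ _ 21 _ hx2b
  have H28 : ∀ b j, (X3 + b <<< 28).testBit j
      = if j < 28 then X3.testBit j else b.testBit (j - 28) := fun b j => pvAddShift _ _ 28 _ hx3b
  apply Nat.eq_of_testBit_eq; intro i
  rcases lt_or_ge i 32 with hi | hi
  · interval_cases i <;>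
      (simp only [H28, Nat.testBit_xor, Nat.testBit_and, Nat.testBit_shiftRight, Nat.testBit_shiftLeft, pvBits2636928640, pvBits45, pvBits49, pvBits105, pvBits9, pvMod128, pvMod16, pvBitsMask, Nat.reduceSub, Nat.reduceAdd, Nat.reduceLT, Nat.reduceLeDiff, reduceIte, decide_eq_true_eq, List.mem_cons, List.mem_singleton, List.not_mem_nil]
       simp only [← hx3, H21, Nat.testBit_xor, Nat.testBit_and, Nat.testBit_shiftRight, Nat.testBit_shiftLeft, pvBits2636928640, pvBits45, pvBits49, pvBits105, pvBits9, pvMod128, pvMod16, pvBitsMask, Nat.reduceSub, Nat.reduceAdd, Nat.reduceLT, Nat.reduceLeDiff, reduceIte, decide_eq_true_eq, List.mem_cons, List.mem_singleton, List.not_mem_nil]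
       simp only [← hx2, H14, Nat.testBit_xor, Nat.testBit_and, Nat.testBit_shiftRight, Nat.testBit_shiftLeft, pvBits2636928640, pvBits45, pvBits49, pvBits105, pvBits9, pvMod128, pvMod16, pvBitsMask, Nat.reduceSub, Nat.reduceAdd, Nat.reduceLT, Nat.reduceLeDiff, reduceIte, decide_eq_true_eq, List.mem_cons, List.mem_singleton, List.not_mem_nil]
       simp only [← hx1, H7, Nat.testBit_xor, Nat.testBit_and, Nat.testBit_shiftRight, Nat.testBit_shiftLeft, pvBits2636928640, pvBits45, pvBits49, pvBits105, pvBits9, pvMod128, pvMod16, pvBitsMask, Nat.reduceSub, Nat.reduceAdd, Nat.reduceLT, Nat.reduceLeDiff, reduceIte, decide_eq_true_eq, List.mem_cons, List.mem_singleton, List.not_mem_nil]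
       simp [h30, Bool.xor_comm, Bool.xor_left_comm, Bool.xor_assoc, Bool.and_comm, Bool.and_left_comm, Bool.and_assoc])
  · simp only [H28, Nat.testBit_xor, Nat.testBit_and, Nat.testBit_shiftRight, Nat.testBit_shiftLeft, pvBits2636928640, pvBits45, pvBits49, pvBits105, pvBits9, pvMod128, pvMod16, pvBitsMask, Nat.reduceSub, Nat.reduceAdd, Nat.reduceLT, Nat.reduceLeDiff, reduceIte, decide_eq_true_eq, List.mem_cons, List.mem_singleton, List.not_mem_nil, show ¬ i < 28 by omega, show ¬ i < 32 by omega]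
    simp only [← hx3, H21, Nat.testBit_xor, Nat.testBit_and, Nat.testBit_shiftRight, Nat.testBit_shiftLeft, pvBits2636928640, pvBits45, pvBits49, pvBits105, pvBits9, pvMod128, pvMod16, pvBitsMask, Nat.reduceSub, Nat.reduceAdd, Nat.reduceLT, Nat.reduceLeDiff, reduceIte, decide_eq_true_eq, List.mem_cons, List.mem_singleton, List.not_mem_nil]
    simp only [← hx2, H14, Nat.testBit_xor, Nat.testBit_and, Nat.testBit_shiftRight, Nat.testBit_shiftLeft, pvBits2636928640, pvBits45, pvBits49, pvBits105, pvBits9, pvMod128, pvMod16, pvBitsMask, Nat.reduceSub, Nat.reduceAdd, Nat.reduceLT, Nat.reduceLeDiff, reduceIte, decide_eq_true_eq, List.mem_cons, List.mem_singleton, List.not_mem_nil]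
    simp only [← hx1, H7, Nat.testBit_xor, Nat.testBit_and, Nat.testBit_shiftRight, Nat.testBit_shiftLeft, pvBits2636928640, pvBits45, pvBits49, pvBits105, pvBits9, pvMod128, pvMod16, pvBitsMask, Nat.reduceSub, Nat.reduceAdd, Nat.reduceLT, Nat.reduceLeDiff, reduceIte, decide_eq_true_eq, List.mem_cons, List.mem_singleton, List.not_mem_nil]
    simp [h30, pvHigh h, show ¬ i - 28 < 4 by omega, show ¬ i < 28 by omega,
      show ¬ i < 21 by omega, show ¬ i < 14 by omega, show ¬ i < 7 by omega]
lemma pvShiftAdd (b a k j : Nat) (h : a < 2^k) :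
    (b <<< k + a).testBit j = if j < k then a.testBit j else b.testBit (j - k) := by
  rw [Nat.add_comm]; exact pvAddShift _ _ _ _ h

lemma pvS4 (y : Nat) (h : y < 2^32) : pvN4 y = pvM4 y := by
  have h30 : ∀ k, 32 ≤ k → y.testBit k = false := fun k hk => pvHigh h hk
  unfold pvN4 pvM4
  rw [Nat.shiftLeft_shiftRight]
  rw [show (y >>> 21 <<< 21) + (((y >>> 10) % 2048) ^^^ ((y >>> 21) &&& 2047)) <<< 10 = ((((y >>> 10) % 2048) ^^^ ((y >>> 21) &&& 2047)) + (y >>> 21) <<< 11) <<< 10 from by simp [Nat.shiftLeft_eq]; ring]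
  have hd1 : (((y >>> 10) % 2048) ^^^ ((y >>> 21) &&& 2047)) < 2^11 :=
    Nat.xor_lt_two_pow (Nat.mod_lt _ (by norm_num)) (Nat.and_lt_two_pow _ (by decide))
  have hd2 : ((y % 1024) ^^^ ((((((y >>> 10) % 2048) ^^^ ((y >>> 21) &&& 2047)) + (y >>> 21) <<< 11) <<< 10) >>> 11) % 1024 &&& 1023) < 2^10 :=
    Nat.xor_lt_two_pow (Nat.mod_lt _ (by norm_num)) (Nat.and_lt_two_pow _ (by decide))
  have H10 : ∀ j, (((((y >>> 10) % 2048) ^^^ ((y >>> 21) &&& 2047)) + (y >>> 21) <<< 11) <<< 10 + ((y % 1024) ^^^ ((((((y >>> 10) % 2048) ^^^ ((y >>> 21) &&& 2047)) + (y >>> 21) <<< 11) <<< 10) >>> 11) % 1024 &&& 1023)).testBit j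
      = if j < 10 then ((y % 1024) ^^^ ((((((y >>> 10) % 2048) ^^^ ((y >>> 21) &&& 2047)) + (y >>> 21) <<< 11) <<< 10) >>> 11) % 1024 &&& 1023).testBit j else ((((y >>> 10) % 2048) ^^^ ((y >>> 21) &&& 2047)) + (y >>> 21) <<< 11).testBit (j - 10) :=
    fun j => pvShiftAdd _ _ 10 _ hd2
  have H11 : ∀ b j, ((((y >>> 10) % 2048) ^^^ ((y >>> 21) &&& 2047)) + b <<< 11).testBit j
      = if j < 11 then (((y >>> 10) % 2048) ^^^ ((y >>> 21) &&& 2047)).testBit j else b.testBit (j - 11) := fun b j => pvAddShift _ _ 11 _ hd1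
  apply Nat.eq_of_testBit_eq; intro i
  rcases lt_or_ge i 32 with hi | hi
  · interval_cases i <;>
      (simp only [H10, H11, Nat.testBit_xor, Nat.testBit_and, Nat.testBit_shiftRight, Nat.testBit_shiftLeft, pvBits2047, pvBits1023, pvMod2048, pvMod1024, pvBitsMask, Nat.reduceSub, Nat.reduceAdd, Nat.reduceLT, Nat.reduceLeDiff, reduceIte, decide_eq_true_eq, List.mem_cons, List.mem_singleton, List.not_mem_nil]
       simp [h30, Bool.xor_comm, Bool.xor_left_comm, Bool.xor_assoc, Bool.and_comm, Bool.and_left_comm, Bool.and_assoc])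
  · simp only [H10, H11, Nat.testBit_xor, Nat.testBit_and, Nat.testBit_shiftRight, Nat.testBit_shiftLeft, pvBits2047, pvBits1023, pvMod2048, pvMod1024, pvBitsMask, Nat.reduceSub, Nat.reduceAdd, Nat.reduceLT, Nat.reduceLeDiff, reduceIte, decide_eq_true_eq, List.mem_cons, List.mem_singleton, List.not_mem_nil, show ¬ i < 10 by omega, show ¬ i < 11 by omega,
      show ¬ i - 10 < 11 by omega, show ¬ i < 32 by omega]
    simp [h30, pvHigh h, show ¬ i < 10 by omega, show ¬ i - 10 < 11 by omega,
      h30 (21 + (i - 10 - 11)) (by omega)]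

lemma pvG1 : ((0xEFC6 : Int) >>> (1 : Int)) = 30691 := by decide
lemma pvG6 : PySem.Int.mod ((0x9D2C5680 : Int) >>> (7 : Int)) (2 ^ 7) = 45 := by decide
lemma pvG7 : PySem.Int.mod ((0x9D2C5680 : Int) >>> (14 : Int)) (2 ^ 7) = 49 := by decide
lemma pvG8 : PySem.Int.mod ((0x9D2C5680 : Int) >>> (21 : Int)) (2 ^ 7) = 105 := by decide
lemma pvG9 : PySem.Int.mod ((0x9D2C5680 : Int) >>> (28 : Int)) 16 = 9 := by decide
lemma pvShR0 (a : Nat) : ((a : Nat) : Int) >>> (0 : Int) = ((a >>> 0 : Nat) : Int) := rfl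
lemma pvShR2 (a : Nat) : ((a : Nat) : Int) >>> (2 : Int) = ((a >>> 2 : Nat) : Int) := rfl
lemma pvShR7 (a : Nat) : ((a : Nat) : Int) >>> (7 : Int) = ((a >>> 7 : Nat) : Int) := rfl
lemma pvShR10 (a : Nat) : ((a : Nat) : Int) >>> (10 : Int) = ((a >>> 10 : Nat) : Int) := rfl
lemma pvShR11 (a : Nat) : ((a : Nat) : Int) >>> (11 : Int) = ((a >>> 11 : Nat) : Int) := rfl
lemma pvShR14 (a : Nat) : ((a : Nat) : Int) >>> (14 : Int) = ((a >>> 14 : Nat) : Int) := rfl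
lemma pvShR17 (a : Nat) : ((a : Nat) : Int) >>> (17 : Int) = ((a >>> 17 : Nat) : Int) := rfl
lemma pvShR18 (a : Nat) : ((a : Nat) : Int) >>> (18 : Int) = ((a >>> 18 : Nat) : Int) := rfl
lemma pvShR21 (a : Nat) : ((a : Nat) : Int) >>> (21 : Int) = ((a >>> 21 : Nat) : Int) := rfl
lemma pvShR28 (a : Nat) : ((a : Nat) : Int) >>> (28 : Int) = ((a >>> 28 : Nat) : Int) := rfl
lemma pvShL7 (a : Nat) : ((a : Nat) : Int) <<< (7 : Int) = ((a <<< 7 : Nat) : Int) := rfl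
lemma pvShL10 (a : Nat) : ((a : Nat) : Int) <<< (10 : Int) = ((a <<< 10 : Nat) : Int) := rfl
lemma pvShL14 (a : Nat) : ((a : Nat) : Int) <<< (14 : Int) = ((a <<< 14 : Nat) : Int) := rfl
lemma pvShL15 (a : Nat) : ((a : Nat) : Int) <<< (15 : Int) = ((a <<< 15 : Nat) : Int) := rfl
lemma pvShL17 (a : Nat) : ((a : Nat) : Int) <<< (17 : Int) = ((a <<< 17 : Nat) : Int) := rfl
lemma pvShL21 (a : Nat) : ((a : Nat) : Int) <<< (21 : Int) = ((a <<< 21 : Nat) : Int) := rfl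
lemma pvShL28 (a : Nat) : ((a : Nat) : Int) <<< (28 : Int) = ((a <<< 28 : Nat) : Int) := rfl
lemma pvCastBxor (a b : Nat) : PySem.Int.bxor ((a : Nat) : Int) ((b : Nat) : Int) = ((a ^^^ b : Nat) : Int) :=
  PySem.Int.bxor_natCast a b
lemma pvCastAdd (a b : Nat) : ((a : Nat) : Int) + ((b : Nat) : Int) = ((a + b : Nat) : Int) := by
  exact_mod_cast rfl
lemma pvCastMod17 (a : Nat) : PySem.Int.mod ((a : Nat) : Int) (2 ^ 17) = ((a % 131072 : Nat) : Int) := by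
  rw [show ((2:Int) ^ 17) = ((131072 : Nat) : Int) from by norm_num, PySem.Int.mod_natCast]
lemma pvCastMod7 (a : Nat) : PySem.Int.mod ((a : Nat) : Int) (2 ^ 7) = ((a % 128 : Nat) : Int) := by
  rw [show ((2:Int) ^ 7) = ((128 : Nat) : Int) from by norm_num, PySem.Int.mod_natCast]
lemma pvCastMod16 (a : Nat) : PySem.Int.mod ((a : Nat) : Int) 16 = ((a % 16 : Nat) : Int) := by
  rw [show (16:Int) = ((16 : Nat) : Int) from by norm_num, PySem.Int.mod_natCast]
lemma pvCastMod11 (a : Nat) : PySem.Int.mod ((a : Nat) : Int) (2 ^ 11) = ((a % 2048 : Nat) : Int) := by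
  rw [show ((2:Int) ^ 11) = ((2048 : Nat) : Int) from by norm_num, PySem.Int.mod_natCast]
lemma pvCastMod10 (a : Nat) : PySem.Int.mod ((a : Nat) : Int) (2 ^ 10) = ((a % 1024 : Nat) : Int) := by
  rw [show ((2:Int) ^ 10) = ((1024 : Nat) : Int) from by norm_num, PySem.Int.mod_natCast]
lemma pvCastBand30691 (a : Nat) : PySem.Int.band ((a : Nat) : Int) 30691 = ((a &&& 30691 : Nat) : Int) := by
  rw [show (30691:Int) = ((30691 : Nat) : Int) from by norm_num, PySem.Int.band_natCast]
lemma pvCastBand45 (a : Nat) : PySem.Int.band ((a : Nat) : Int) 45 = ((a &&& 45 : Nat) : Int) := by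
  rw [show (45:Int) = ((45 : Nat) : Int) from by norm_num, PySem.Int.band_natCast]
lemma pvCastBand49 (a : Nat) : PySem.Int.band ((a : Nat) : Int) 49 = ((a &&& 49 : Nat) : Int) := by
  rw [show (49:Int) = ((49 : Nat) : Int) from by norm_num, PySem.Int.band_natCast]
lemma pvCastBand105 (a : Nat) : PySem.Int.band ((a : Nat) : Int) 105 = ((a &&& 105 : Nat) : Int) := by
  rw [show (105:Int) = ((105 : Nat) : Int) from by norm_num, PySem.Int.band_natCast]
lemma pvCastBand9 (a : Nat) : PySem.Int.band ((a : Nat) : Int) 9 = ((a &&& 9 : Nat) : Int) := by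
  rw [show (9:Int) = ((9 : Nat) : Int) from by norm_num, PySem.Int.band_natCast]
lemma pvCastBand2047 (a : Nat) : PySem.Int.band ((a : Nat) : Int) 2047 = ((a &&& 2047 : Nat) : Int) := by
  rw [show (2047:Int) = ((2047 : Nat) : Int) from by norm_num, PySem.Int.band_natCast]
lemma pvCastBand1023 (a : Nat) : PySem.Int.band ((a : Nat) : Int) 1023 = ((a &&& 1023 : Nat) : Int) := by
  rw [show (1023:Int) = ((1023 : Nat) : Int) from by norm_num, PySem.Int.band_natCast]
lemma pvCastBand4022730752 (a : Nat) : PySem.Int.band ((a : Nat) : Int) 4022730752 = ((a &&& 4022730752 : Nat) : Int) := by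
  rw [show (4022730752:Int) = ((4022730752 : Nat) : Int) from by norm_num, PySem.Int.band_natCast]
lemma pvCastBand2636928640 (a : Nat) : PySem.Int.band ((a : Nat) : Int) 2636928640 = ((a &&& 2636928640 : Nat) : Int) := by
  rw [show (2636928640:Int) = ((2636928640 : Nat) : Int) from by norm_num, PySem.Int.band_natCast]
lemma pvCastBand4294967295 (a : Nat) : PySem.Int.band ((a : Nat) : Int) 4294967295 = ((a &&& 4294967295 : Nat) : Int) := by
  rw [show (4294967295:Int) = ((4294967295 : Nat) : Int) from by norm_num, PySem.Int.band_natCast]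

-- stage decomposition of port A's loop body (proof helpers)
def pvA1i (x : Int) : Int := PySem.Int.bxor x (x >>> 18)
def pvA2i (x_3 : Int) : Int :=
  let x_2 := PySem.Int.mod x_3 (2 ^ 17)
  x_2 + (PySem.Int.bxor (PySem.Int.band (x_2 >>> 2) ((0xEFC6 : Int) >>> 1)) (x_3 >>> 17)) <<< 17
def pvA3i (x_2 : Int) : Int :=
  let x_1 := PySem.Int.mod x_2 (2 ^ 7)
  let magic_num : Int := 0x9D2C5680
  let x_1 := (PySem.List.pyRange 0 3 1).foldl (fun (x_1 : Int) i =>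
      let a := 7 * i
      let b := 7 * (i + 1)
      let c : Int := 2 ^ 7
      let l := PySem.Int.mod (x_1 >>> a) c
      let m := PySem.Int.mod (magic_num >>> b) c
      let n := PySem.Int.mod (x_2 >>> b) c
      x_1 + (PySem.Int.bxor (PySem.Int.band l m) n) <<< b) x_1
  x_1 + (PySem.Int.bxor (PySem.Int.band (PySem.Int.mod (x_1 >>> 21) 16)
            (PySem.Int.mod (magic_num >>> 28) 16)) (PySem.Int.mod (x_2 >>> 28) 16)) <<< 28
def pvA4i (x_1 : Int) : Int :=
  let x_0 := (x_1 >>> 21) <<< 21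
  let x_0 := x_0 + (PySem.Int.bxor (PySem.Int.mod (x_1 >>> 10) (2 ^ 11))
                      (PySem.Int.band (x_0 >>> 21) 2047)) <<< 10
  x_0 + PySem.Int.bxor (PySem.Int.mod x_1 (2 ^ 10))
          (PySem.Int.band (PySem.Int.mod (x_0 >>> 11) (2 ^ 10)) 1023)

lemma pvCastA1 (m : Nat) : pvA1i ((m : Nat) : Int) = ((pvN1 m : Nat) : Int) := by
  unfold pvA1i pvN1
  simp only [pvShR18, pvCastBxor]
lemma pvCastA2 (m : Nat) : pvA2i ((m : Nat) : Int) = ((pvN2 m : Nat) : Int) := by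
  unfold pvA2i pvN2
  simp only [pvG1]
  simp only [pvCastMod17, pvShR2, pvShR17, pvShL17, pvCastBand30691, pvCastBxor, pvCastAdd]
lemma pvCastA3 (m : Nat) : pvA3i ((m : Nat) : Int) = ((pvN3 m : Nat) : Int) := by
  unfold pvA3i pvN3
  rw [show PySem.List.pyRange 0 3 1 = [0, 1, 2] from by decide]
  simp only [List.foldl]
  simp only [Int.reduceAdd, Int.reduceMul]
  simp only [pvG6, pvG7, pvG8, pvG9]
  simp only [pvCastMod7, pvCastMod16, pvShR0, pvShR7, pvShR14, pvShR21, pvShR28,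
    pvShL7, pvShL14, pvShL21, pvShL28, pvCastBand45, pvCastBand49, pvCastBand105,
    pvCastBand9, pvCastBxor, pvCastAdd]
lemma pvCastA4 (m : Nat) : pvA4i ((m : Nat) : Int) = ((pvN4 m : Nat) : Int) := by
  unfold pvA4i pvN4
  simp only [pvCastMod11, pvCastMod10, pvShR10, pvShR11, pvShR21, pvShL10, pvShL21,
    pvCastBand2047, pvCastBand1023, pvCastBxor, pvCastAdd]

lemma pvCastBR18 (m : Nat) : pvUndoRightShift ((m : Nat) : Int) 18 = ((pvM1 m : Nat) : Int) := by
  unfold pvUndoRightShift pvM1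
  rw [show PySem.List.pyRange 0 (-(PySem.Int.floordiv (-32) 18)) 1 = [0, 1] from by decide]
  simp only [List.foldl]
  simp only [pvShR18, pvCastBxor, pvCastBand4294967295]
lemma pvCastBL15 (m : Nat) : pvUndoLeftShift ((m : Nat) : Int) 15 0xEFC60000 = ((pvM2 m : Nat) : Int) := by
  unfold pvUndoLeftShift pvM2
  rw [show PySem.List.pyRange 0 (-(PySem.Int.floordiv (-32) 15)) 1 = [0, 1, 2] from by decide]
  simp only [List.foldl]
  simp only [pvShL15, pvCastBand4022730752, pvCastBxor, pvCastBand4294967295]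
lemma pvCastBL7 (m : Nat) : pvUndoLeftShift ((m : Nat) : Int) 7 0x9D2C5680 = ((pvM3 m : Nat) : Int) := by
  unfold pvUndoLeftShift pvM3
  rw [show PySem.List.pyRange 0 (-(PySem.Int.floordiv (-32) 7)) 1 = [0, 1, 2, 3, 4] from by decide]
  simp only [List.foldl]
  simp only [pvShL7, pvCastBand2636928640, pvCastBxor, pvCastBand4294967295]
lemma pvCastBR11 (m : Nat) : pvUndoRightShift ((m : Nat) : Int) 11 = ((pvM4 m : Nat) : Int) := by
  unfold pvUndoRightShift pvM4
  rw [show PySem.List.pyRange 0 (-(PySem.Int.floordiv (-32) 11)) 1 = [0, 1, 2] from by decide]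
  simp only [List.foldl]
  simp only [pvShR11, pvCastBxor, pvCastBand4294967295]
lemma pvCastB (m : Nat) :
    pvUndoRightShift (pvUndoLeftShift (pvUndoLeftShift (pvUndoRightShift ((m : Nat) : Int) 18) 15 0xEFC60000) 7 0x9D2C5680) 11
    = ((pvM4 (pvM3 (pvM2 (pvM1 m))) : Nat) : Int) := by
  rw [pvCastBR18, pvCastBL15, pvCastBL7, pvCastBR11]

lemma pvElem (x : Int) (h0 : 0 ≤ x) (h32 : x < 2 ^ 32) :
    pvA4i (pvA3i (pvA2i (pvA1i x)))
    = pvUndoRightShift (pvUndoLeftShift (pvUndoLeftShift (pvUndoRightShift x 18) 15 0xEFC60000) 7 0x9D2C5680) 11 := by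
  lift x to ℕ using h0 with m
  have hm : m < 2 ^ 32 := by exact_mod_cast h32
  rw [pvCastA1 m, pvCastA2 (pvN1 m), pvCastA3 (pvN2 (pvN1 m)), pvCastA4 (pvN3 (pvN2 (pvN1 m)))]
  have h3 : pvN4 (pvN3 (pvN2 (pvN1 m))) = pvM4 (pvM3 (pvM2 (pvM1 m))) := by
    rw [pvS1 m hm, pvS2 _ (pvM1_lt _), pvS3 _ (pvM2_lt _), pvS4 _ (pvM3_lt _)]
  rw [h3, ← pvCastB m]

-- ===== VERDICT (by name: the statement is the Claim_ definition above) =====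
theorem recover_rng_state_spec : Claim_equal_recover_rng_state := by
  unfold Claim_equal_recover_rng_state
  intro source hdom hpre
  unfold Spec_recover_rng_state
  unfold recover_rng_state recover_rng_state_alt
  rw [PySem.List.foldl_append_singleton_eq_map, List.nil_append]
  apply List.map_congr_left
  intro y hy
  obtain ⟨hs, h0, h32⟩ := hpre y hy
  exact pvElem _ h0 h32
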